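-- pv_equiv track=rewrite | github.com/david-arruga/Compilation-from-ATL-to-ACG | buchi_solver/predecessor.py | predecessor_2
-- ===== SOURCE A (Python) =====
-- def predecessor_2(E, S1, S2, X):
--     predecessor = set()
--     for (src, dst) in E.keys():
--         if dst in X:
--             if src in S2:
--                 predecessor.add(src)
--             elif src in S1:
--                 successors = {d for (s, d) in E if s == src}
--                 if successors <= X:
--                     predecessor.add(src)
--     return predecessor
-- ===== SOURCE B (Python) =====
-- def predecessor_2(E, S1, S2, X):
--     into_X = {s for (s, d) in E.keys() if d in X}
--     out_X = {s for (s, d) in E.keys() if d not in X}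
--     return {s for s in into_X if s in S2 or (s in S1 and s not in out_X)}
-- ===== Notes on version B (the rewrite author's own statement) =====
-- stated objective: simpler
-- what changed: Two whole-set comprehension passes over E.keys() build into_X and out_X, and one final comprehension selects the qualifying sources via 's not in out_X', replacing A's per-edge if/elif branching that rebuilds a successor set and runs a subset test inside the loop.
import Mathlib
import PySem

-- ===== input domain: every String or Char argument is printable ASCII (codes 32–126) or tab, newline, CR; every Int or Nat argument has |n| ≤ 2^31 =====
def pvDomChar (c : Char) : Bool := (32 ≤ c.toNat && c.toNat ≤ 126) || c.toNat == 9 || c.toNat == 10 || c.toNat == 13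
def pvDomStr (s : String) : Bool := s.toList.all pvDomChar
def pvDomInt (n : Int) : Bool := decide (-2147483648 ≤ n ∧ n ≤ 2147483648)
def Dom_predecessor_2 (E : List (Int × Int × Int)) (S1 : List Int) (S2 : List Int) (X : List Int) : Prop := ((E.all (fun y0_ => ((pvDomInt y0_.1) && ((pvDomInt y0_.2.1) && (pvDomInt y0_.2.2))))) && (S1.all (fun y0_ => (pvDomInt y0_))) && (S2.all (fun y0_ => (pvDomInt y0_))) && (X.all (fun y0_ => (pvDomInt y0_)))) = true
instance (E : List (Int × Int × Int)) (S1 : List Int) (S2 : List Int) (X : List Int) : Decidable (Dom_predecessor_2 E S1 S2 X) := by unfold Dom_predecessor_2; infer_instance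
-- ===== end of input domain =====

-- B replaces A's per-edge branching (which rebuilds a successor set and tests a subset per edge)
-- by two comprehension passes building into_X / out_X plus one final selecting comprehension (objective: simpler).

-- ===== PORT A =====
def predecessor_2 (E : List (Int × Int × Int)) (S1 : List Int) (S2 : List Int) (X : List Int) : List Int :=
  E.foldl (fun predecessor e =>
    let src := e.1
    let dst := e.2.1
    if X.contains dst then
      if S2.contains src then PySem.Set.add predecessor src
      else if S1.contains src then
        let successors : PySem.Set Int :=
          PySem.Set.ofList (E.filterMap (fun e' => if e'.1 == src then some e'.2.1 else none))
        if PySem.Set.issubset successors X then PySem.Set.add predecessor src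
        else predecessor
      else predecessor
    else predecessor) PySem.Set.empty

-- ===== PORT B =====
def predecessor_2_alt (E : List (Int × Int × Int)) (S1 : List Int) (S2 : List Int) (X : List Int) : List Int :=
  let intoX : PySem.Set Int :=
    PySem.Set.ofList (E.filterMap (fun e => if X.contains e.2.1 then some e.1 else none))
  let outX : PySem.Set Int :=
    PySem.Set.ofList (E.filterMap (fun e => if !(X.contains e.2.1) then some e.1 else none))
  PySem.Set.ofList (intoX.filter (fun s =>
    S2.contains s || (S1.contains s && !(PySem.Set.contains outX s))))

-- ===== PRECONDITION & SPEC =====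
def Spec_predecessor_2 (E : List (Int × Int × Int)) (S1 : List Int) (S2 : List Int) (X : List Int) (out : List Int) : Prop := out = predecessor_2_alt E S1 S2 X
instance (E : List (Int × Int × Int)) (S1 : List Int) (S2 : List Int) (X : List Int) (out : List Int) : Decidable (Spec_predecessor_2 E S1 S2 X out) := by unfold Spec_predecessor_2; infer_instance

-- ===== CLAIM (what is proved, stated in full; the proofs are below) =====
def Claim_equal_predecessor_2 : Prop := ∀ (E : List (Int × Int × Int)) (S1 : List Int) (S2 : List Int) (X : List Int), Dom_predecessor_2 E S1 S2 X → Spec_predecessor_2 E S1 S2 X (predecessor_2 E S1 S2 X)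

-- ===== LEMMAS AND PROOFS =====

-- A's loop body as a single guarded Set.add
lemma bodyA_eq (E : List (Int × Int × Int)) (S1 S2 X : List Int)
    (p : List Int) (e : Int × Int × Int) :
    (if X.contains e.2.1 then
      if S2.contains e.1 then PySem.Set.add p e.1
      else if S1.contains e.1 then
        if PySem.Set.issubset
            (PySem.Set.ofList (E.filterMap (fun e' => if e'.1 == e.1 then some e'.2.1 else none))) X
          then PySem.Set.add p e.1 else p
      else p
    else p)
    = (if X.contains e.2.1 &&
          (S2.contains e.1 || (S1.contains e.1 &&
            PySem.Set.issubset
              (PySem.Set.ofList (E.filterMap (fun e' => if e'.1 == e.1 then some e'.2.1 else none))) X))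
        then PySem.Set.add p e.1 else p) := by
  cases hX : X.contains e.2.1 <;> cases h2 : S2.contains e.1 <;> cases h1 : S1.contains e.1 <;>
      cases hsub : PySem.Set.issubset
        (PySem.Set.ofList (E.filterMap (fun e' => if e'.1 == e.1 then some e'.2.1 else none))) X <;>
    simp_all

-- fold of guarded adds = fold of adds over the filtered key list
lemma foldl_add_guard (g : (Int × Int × Int) → Bool) :
    ∀ (l : List (Int × Int × Int)) (acc : List Int),
    l.foldl (fun p e => if g e then PySem.Set.add p e.1 else p) acc
      = (l.filterMap (fun e => if g e then some e.1 else none)).foldl PySem.Set.add acc := by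
  intro l
  induction l with
  | nil => intro acc; rfl
  | cons e l ih =>
    intro acc
    cases hg : g e <;> simp [hg, ih]

-- filterMap with a conjunctive guard = filter applied afterwards
lemma filterMap_and (g : (Int × Int × Int) → Bool) (c : Int → Bool) :
    ∀ (l : List (Int × Int × Int)),
    l.filterMap (fun e => if g e && c e.1 then some e.1 else none)
      = (l.filterMap (fun e => if g e then some e.1 else none)).filter c := by
  intro l
  induction l with
  | nil => rfl
  | cons e l ih =>
    cases hg : g e <;> cases hc : c e.1 <;>
      simp_all

-- List.filter commutes with Set.add
lemma filter_add (c : Int → Bool) (s : List Int) (x : Int) :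
    List.filter c (PySem.Set.add s x)
      = if c x then PySem.Set.add (List.filter c s) x else List.filter c s := by
  by_cases hx : x ∈ s <;> cases hc : c x <;>
    simp [PySem.Set.add_eq_ite, hx, hc, List.filter_append, List.mem_filter]

-- List.filter commutes with building a set by folded adds
lemma filter_foldl_add (c : Int → Bool) :
    ∀ (xs acc : List Int),
    List.filter c (xs.foldl PySem.Set.add acc)
      = (xs.filter c).foldl PySem.Set.add (List.filter c acc) := by
  intro xs
  induction xs with
  | nil => intro acc; rfl
  | cons x xs ih =>
    intro acc
    cases hc : c x <;> simp [List.filter_cons, hc, ih, filter_add]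

-- A's per-source subset test equals B's "no edge out of X" test
lemma subset_eq_not_out (E : List (Int × Int × Int)) (X : List Int) (s : Int) :
    PySem.Set.issubset
      (PySem.Set.ofList (E.filterMap (fun e' => if e'.1 == s then some e'.2.1 else none))) X
    = !(PySem.Set.contains
        (PySem.Set.ofList (E.filterMap (fun e => if !(X.contains e.2.1) then some e.1 else none))) s) := by
  rw [Bool.eq_iff_iff]
  constructor
  · intro hsub
    have hns : PySem.Set.contains
        (PySem.Set.ofList (E.filterMap (fun e => if !(X.contains e.2.1) then some e.1 else none))) s
        = false := by
      by_contra hb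
      rw [Bool.not_eq_false, PySem.Set.contains_iff, PySem.Set.mem_ofList,
        List.mem_filterMap] at hb
      obtain ⟨e, he, hsome⟩ := hb
      by_cases hX : X.contains e.2.1
      · simp only [hX, Bool.not_true, Bool.false_eq_true, if_false] at hsome
        cases hsome
      · simp only [hX, Bool.not_false, if_true, Option.some.injEq] at hsome
        rw [PySem.Set.issubset_iff] at hsub
        have hd : e.2.1 ∈ X := by
          apply hsub
          rw [PySem.Set.mem_ofList, List.mem_filterMap]
          exact ⟨e, he, by simp [hsome]⟩
        exact hX (List.elem_eq_true_of_mem hd)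
    simp only [hns, Bool.not_false]
  · intro hb
    rw [Bool.not_eq_true'] at hb
    rw [PySem.Set.issubset_iff]
    intro d hd
    rw [PySem.Set.mem_ofList, List.mem_filterMap] at hd
    obtain ⟨e, he, hsome⟩ := hd
    by_cases hs : e.1 == s
    · simp only [hs, if_true, Option.some.injEq] at hsome
      by_contra hdX
      have : PySem.Set.contains
          (PySem.Set.ofList (E.filterMap (fun e => if !(X.contains e.2.1) then some e.1 else none))) s
          = true := by
        rw [PySem.Set.contains_iff, PySem.Set.mem_ofList, List.mem_filterMap]
        refine ⟨e, he, ?_⟩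
        have hXe : X.contains e.2.1 = false := by
          rw [hsome, Bool.eq_false_iff]
          intro hc
          exact hdX (List.mem_of_elem_eq_true hc)
        simp only [hXe, Bool.not_false, if_true, Option.some.injEq]
        exact beq_iff_eq.mp hs
      rw [hb] at this
      exact Bool.false_ne_true this
    · simp [hs] at hsome

-- ===== VERDICT (by name: the statement is the Claim_ definition above) =====
theorem predecessor_2_spec : Claim_equal_predecessor_2 := by
  intro E S1 S2 X _
  unfold Spec_predecessor_2 predecessor_2 predecessor_2_alt
  simp only
  have hbody :
      (fun (p : List Int) (e : Int × Int × Int) =>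
        if X.contains e.2.1 then
          if S2.contains e.1 then PySem.Set.add p e.1
          else if S1.contains e.1 then
            if PySem.Set.issubset
                (PySem.Set.ofList (E.filterMap (fun e' => if e'.1 == e.1 then some e'.2.1 else none))) X
              then PySem.Set.add p e.1 else p
          else p
        else p)
      = (fun p e =>
        if X.contains e.2.1 &&
            (S2.contains e.1 || (S1.contains e.1 &&
              !(PySem.Set.contains
                (PySem.Set.ofList (E.filterMap (fun e => if !(X.contains e.2.1) then some e.1 else none))) e.1)))
          then PySem.Set.add p e.1 else p) := by
    funext p e
    rw [bodyA_eq E S1 S2 X p e, subset_eq_not_out E X e.1]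
  rw [hbody, foldl_add_guard, filterMap_and (fun e => X.contains e.2.1)
    (fun s => S2.contains s || (S1.contains s &&
      !(PySem.Set.contains (PySem.Set.ofList
        (E.filterMap (fun e => if !(X.contains e.2.1) then some e.1 else none))) s))) E]
  have h3 := filter_foldl_add
      (fun s => S2.contains s || (S1.contains s &&
        !(PySem.Set.contains (PySem.Set.ofList
          (E.filterMap (fun e => if !(X.contains e.2.1) then some e.1 else none))) s)))
      (E.filterMap (fun e => if X.contains e.2.1 then some e.1 else none)) []
  simp only [List.filter_nil] at h3
  rw [← PySem.Set.ofList_eq_foldl, ← PySem.Set.ofList_eq_foldl] at h3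
  rw [show (PySem.Set.empty : PySem.Set Int) = ([] : List Int) from rfl,
    ← PySem.Set.ofList_eq_foldl, ← h3]
  exact (PySem.Set.ofList_eq_self_of_nodup _ ((PySem.Set.nodup_ofList _).filter _)).symm
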